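-- pv_equiv track=rewrite | github.com/NZ369/OriFinder | main.py | SymbolArray
-- ===== SOURCE A (Python) =====
-- def PatternCount(Pattern,Text):
--     count = 0
--     for i in range(len(Text)-len(Pattern)+1):
--         if Text[i:i+len(Pattern)] == Pattern:
--             count = count+1
--     return count
--
-- def SymbolArray(Genome, symbol):
--     array = {}
--     n = len(Genome)
--     ExtendedGenome = Genome + Genome[0:n//2]
--
--     # look at the first half of Genome to compute first array value
--     array[0] = PatternCount(symbol, Genome[0:n//2])
--
--     for i in range(1, n):
--         # start by setting the current array value equal to the previous array value
--         array[i] = array[i-1]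
--
--         # the current array value can differ from the previous array value by at most 1
--         if ExtendedGenome[i-1] == symbol:
--             array[i] = array[i]-1
--         if ExtendedGenome[i+(n//2)-1] == symbol:
--             array[i] = array[i]+1
--     return array
-- ===== SOURCE B (Python) =====
-- def PatternCount(Pattern,Text):
--     count = 0
--     for i in range(len(Text)-len(Pattern)+1):
--         if Text[i:i+len(Pattern)] == Pattern:
--             count = count+1
--     return count
--
-- def SymbolArray(Genome, symbol):
--     # prefix sums of single-character matches over the extended genome,
--     # then each array value is a closed-form difference of prefix sums
--     n = len(Genome)
--     h = n // 2
--     ExtendedGenome = Genome + Genome[0:h]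
--     prefix = [0]
--     for ch in ExtendedGenome:
--         prefix.append(prefix[-1] + (1 if ch == symbol else 0))
--     base = PatternCount(symbol, Genome[0:h])
--     array = {0: base}
--     for i in range(1, n):
--         array[i] = base + (prefix[i + h] - prefix[h]) - prefix[i]
--     return array
-- ===== Notes on version B (the rewrite author's own statement) =====
-- stated objective: alternative
-- what changed: SymbolArray's incremental sliding-window update (each array value derived from the previous one by +-1 corrections) is replaced by building a prefix-sum table of symbol matches over the extended genome once and computing every array value by a closed-form difference of three prefix sums.
import Mathlib
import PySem

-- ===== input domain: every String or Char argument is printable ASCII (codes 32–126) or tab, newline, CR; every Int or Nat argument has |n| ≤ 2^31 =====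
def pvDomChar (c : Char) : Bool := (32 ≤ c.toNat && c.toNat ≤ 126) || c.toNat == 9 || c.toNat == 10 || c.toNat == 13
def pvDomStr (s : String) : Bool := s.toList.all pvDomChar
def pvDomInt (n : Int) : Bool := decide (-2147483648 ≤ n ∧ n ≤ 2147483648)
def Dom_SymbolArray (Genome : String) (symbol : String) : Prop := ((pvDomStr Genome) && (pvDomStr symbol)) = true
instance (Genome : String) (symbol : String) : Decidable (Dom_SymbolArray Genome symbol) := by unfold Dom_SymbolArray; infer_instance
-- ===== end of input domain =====

-- B replaces A's incremental ±1 sliding-window update by a prefix-sum table with a closed-form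
-- window count per index (objective: alternative algorithm, similar cost); return values are equal on all inputs.

-- ===== PORT A =====
-- strings are modelled as List Char throughout (PySem convention); patternCount is the
-- shared helper PatternCount, defined identically in A's module and in Source B
def patternCount (Pattern Text : List Char) : Int :=
  (PySem.List.pyRange 0 ((Text.length : Int) - (Pattern.length : Int) + 1) 1).foldl
    (fun count i =>
      if PySem.List.slice Text (some i) (some (i + (Pattern.length : Int))) = Pattern
      then count + 1 else count) 0

def SymbolArray (Genome : String) (symbol : String) : List (Int × Int) :=
  let g := Genome.toList
  let sym := symbol.toList
  let n : Int := g.length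
  let half := PySem.Int.floordiv n 2
  let E := g ++ PySem.List.slice g (some 0) (some half)
  let d0 : PySem.Dict Int Int :=
    (PySem.Dict.empty).insert 0 (patternCount sym (PySem.List.slice g (some 0) (some half)))
  let d := (PySem.List.pyRange 1 n 1).foldl (fun d i =>
      let d1 := d.insert i (d.getD (i - 1) 0)
      let d2 := if (PySem.List.pyGet? E (i - 1)).map (fun c => [c]) = some sym
                then d1.insert i (d1.getD i 0 - 1) else d1
      if (PySem.List.pyGet? E (i + half - 1)).map (fun c => [c]) = some sym
      then d2.insert i (d2.getD i 0 + 1) else d2) d0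
  d.items

-- ===== PORT B =====
def SymbolArray_alt (Genome : String) (symbol : String) : List (Int × Int) :=
  let g := Genome.toList
  let sym := symbol.toList
  let n : Int := g.length
  let half := PySem.Int.floordiv n 2
  let E := g ++ PySem.List.slice g (some 0) (some half)
  let pre := E.foldl
    (fun P ch => P ++ [PySem.List.pyGetD P (-1) 0 + (if [ch] = sym then 1 else 0)]) ([0] : List Int)
  let base := patternCount sym (PySem.List.slice g (some 0) (some half))
  let d := (PySem.List.pyRange 1 n 1).foldl
      (fun d i => d.insert i
        (base + (PySem.List.pyGetD pre (i + half) 0 - PySem.List.pyGetD pre half 0)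
              - PySem.List.pyGetD pre i 0))
      ((PySem.Dict.empty : PySem.Dict Int Int).insert 0 base)
  d.items


-- ===== PRECONDITION & SPEC =====
def Spec_SymbolArray (Genome : String) (symbol : String) (out : List (Int × Int)) : Prop := out = SymbolArray_alt Genome symbol
instance (Genome : String) (symbol : String) (out : List (Int × Int)) : Decidable (Spec_SymbolArray Genome symbol out) := by unfold Spec_SymbolArray; infer_instance

-- ===== CLAIM (what is proved, stated in full; the proofs are below) =====
def Claim_equal_SymbolArray : Prop := ∀ (Genome : String) (symbol : String), Dom_SymbolArray Genome symbol → Spec_SymbolArray Genome symbol (SymbolArray Genome symbol)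

-- ===== LEMMAS AND PROOFS =====
def pvcnt (sym E : List Char) (k : Nat) : Int :=
  ((E.take k).countP (fun c => decide ([c] = sym)) : Int)

theorem pvcnt_succ (sym E : List Char) (k : Nat) (hk : k < E.length) :
    pvcnt sym E (k+1) = pvcnt sym E k + (if [E[k]] = sym then 1 else 0) := by
  have h1 : E.take (k+1) = E.take k ++ [E[k]] := by
    rw [List.take_add_one, List.getElem?_eq_getElem hk]; rfl
  unfold pvcnt
  rw [h1, List.countP_append, List.countP_singleton]
  push_cast
  by_cases h : [E[k]] = sym <;> simp [h]

theorem pvcnt_full_append (sym E : List Char) (c : Char) :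
    pvcnt sym (E ++ [c]) (E.length + 1)
      = pvcnt sym E E.length + (if [c] = sym then 1 else 0) := by
  unfold pvcnt
  rw [List.take_of_length_le (by simp), List.take_of_length_le (by simp), List.countP_append, List.countP_singleton]
  push_cast
  by_cases h : [c] = sym <;> simp [h]

theorem pvcnt_append_of_le (sym E : List Char) (c : Char) (k : Nat) (hk : k ≤ E.length) :
    pvcnt sym (E ++ [c]) k = pvcnt sym E k := by
  unfold pvcnt
  rw [List.take_append_of_le_length hk]

theorem pvpre_eq (sym E : List Char) :
    E.foldl (fun P ch => P ++ [PySem.List.pyGetD P (-1) 0 + (if [ch] = sym then 1 else 0)])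
      ([0] : List Int)
    = (List.range (E.length+1)).map (pvcnt sym E) := by
  induction E using List.reverseRecOn with
  | nil => simp [pvcnt]
  | append_singleton E c ih =>
    rw [List.foldl_append]
    simp only [List.foldl_cons, List.foldl_nil, ih]
    have hmap : (List.range (E.length+1)).map (pvcnt sym (E ++ [c]))
        = (List.range (E.length+1)).map (pvcnt sym E) := by
      apply List.map_congr_left
      intro k hk
      simp only [List.mem_range] at hk
      exact pvcnt_append_of_le sym E c k (by omega)
    have hlast : PySem.List.pyGetD ((List.range (E.length+1)).map (pvcnt sym E)) (-1) 0
        = pvcnt sym E E.length := by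
      rw [List.range_succ, List.map_append]
      simp [PySem.List.pyGetD_neg_one_append_singleton]
    rw [hlast]
    have hlen : (E ++ [c]).length + 1 = (E.length + 1) + 1 := by simp
    rw [hlen, List.range_succ (n := E.length + 1), List.map_append, hmap]
    simp only [List.map_cons, List.map_nil]
    rw [pvcnt_full_append]

theorem dict_insert_fresh (L : List (Int × Int)) (i v : Int) (h : i ∉ L.map Prod.fst) :
    (PySem.Dict.mk L).insert i v = PySem.Dict.mk (L ++ [(i, v)]) := by
  apply PySem.Dict.ext
  rw [PySem.Dict.items_insert_of_not_contains]
  rw [PySem.Dict.contains_eq_decide_mem_keys]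
  simpa [PySem.Dict.keys] using h

theorem dict_getD_mem (L : List (Int × Int)) (k v d0 : Int) (hmem : (k, v) ∈ L)
    (hnd : (L.map Prod.fst).Nodup) : (PySem.Dict.mk L).getD k d0 = v := by
  apply PySem.Dict.getD_of_mem_items
  · exact hmem
  · simpa [PySem.Dict.keys] using hnd

theorem dict_getD_last (L : List (Int × Int)) (i v d0 : Int)
    (hnd : (L.map Prod.fst).Nodup) (h : i ∉ L.map Prod.fst) :
    (PySem.Dict.mk (L ++ [(i, v)])).getD i d0 = v := by
  apply dict_getD_mem
  · simp
  · rw [List.map_append, List.nodup_append]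
    refine ⟨hnd, by simp, ?_⟩
    intro a ha c hc
    have hci : c = i := by simpa using hc
    intro hac
    exact h (hci ▸ hac ▸ ha)

theorem dict_insert_last (L : List (Int × Int)) (i x v : Int) (h : i ∉ L.map Prod.fst) :
    (PySem.Dict.mk (L ++ [(i, x)])).insert i v = PySem.Dict.mk (L ++ [(i, v)]) := by
  apply PySem.Dict.ext
  rw [PySem.Dict.items_insert_of_contains]
  · show (L ++ [(i, x)]).map _ = _
    rw [List.map_append]
    congr 1
    · rw [show L = L.map id by simp]
      rw [List.map_map]
      apply List.map_congr_left
      intro p hp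
      simp only [Function.comp, id]
      have : p.1 ≠ i := fun he => h (he ▸ List.mem_map_of_mem (f := Prod.fst) hp)
      simp [this]
    · simp
  · rw [PySem.Dict.contains_eq_decide_mem_keys]
    simp [PySem.Dict.keys]

def pvB (sym E : List Char) (b : Int) (H : Nat) (j : Nat) : Int :=
  b + pvcnt sym E (j + H) - pvcnt sym E H - pvcnt sym E j

theorem pvnodupfst (m : Nat) (f : Nat → Int) :
    (((List.range m).map (fun (j : Nat) => ((j:Int), f j))).map Prod.fst).Nodup := by
  rw [List.map_map]
  have he : (Prod.fst ∘ fun (j : Nat) => ((j:Int), f j)) = (fun (j : Nat) => (j:Int)) := rfl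
  rw [he]
  exact (List.nodup_range).map Nat.cast_injective

theorem loopA (sym E : List Char) (b : Int) (N H : Nat) (hE : E.length = N + H)
    (m : Nat) (hm : m < N) :
    (PySem.List.pyRange 1 (1 + (m:Int)) 1).foldl
      (fun d i =>
        let d1 := d.insert i (d.getD (i - 1) 0)
        let d2 := if (PySem.List.pyGet? E (i - 1)).map (fun c => [c]) = some sym
                  then d1.insert i (d1.getD i 0 - 1) else d1
        if (PySem.List.pyGet? E (i + (H:Int) - 1)).map (fun c => [c]) = some sym
        then d2.insert i (d2.getD i 0 + 1) else d2)
      (PySem.Dict.mk [(0, b)])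
    = PySem.Dict.mk ((List.range (m+1)).map (fun (j : Nat) => ((j:Int), pvB sym E b H j))) := by
  induction m with
  | zero =>
    rw [PySem.List.pyRange_one_eq_nil (by omega)]
    simp [pvB, pvcnt]
  | succ m ih =>
    have hm' : m < N := by omega
    rw [show (1 + ((m+1:Nat):Int)) = (1 + (m:Int)) + 1 by push_cast; ring,
        PySem.List.pyRange_one_succ_right (by omega), List.foldl_append]
    rw [ih hm']
    simp only [List.foldl_cons, List.foldl_nil]
    -- the single step at i = 1 + m
    have hi : (1 : Int) + (m:Int) = ((m+1 : Nat) : Int) := by push_cast; ring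
    have hi1 : (1 : Int) + (m:Int) - 1 = ((m : Nat) : Int) := by ring
    have hi2 : (1 : Int) + (m:Int) + (H:Int) - 1 = ((m + H : Nat) : Int) := by push_cast; ring
    have hmE : m < E.length := by omega
    have hmHE : m + H < E.length := by omega
    have hfresh : ((m+1 : Nat) : Int) ∉
        (((List.range (m+1)).map (fun (j : Nat) => ((j:Int), pvB sym E b H j))).map Prod.fst) := by
      rw [List.map_map]
      simp only [List.mem_map, List.mem_range, Function.comp]
      rintro ⟨j, hj, hje⟩
      have : j = m + 1 := by exact_mod_cast hje
      omega
    have hnd := pvnodupfst (m+1) (pvB sym E b H)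
    have hget1 : (PySem.List.pyGet? E ((1:Int) + (m:Int) - 1)).map (fun c => [c]) = some [E[m]] := by
      rw [hi1, PySem.List.pyGet?_natCast, List.getElem?_eq_getElem hmE]; rfl
    have hget2 : (PySem.List.pyGet? E ((1:Int) + (m:Int) + (H:Int) - 1)).map (fun c => [c])
        = some [E[m + H]] := by
      rw [hi2, PySem.List.pyGet?_natCast, List.getElem?_eq_getElem hmHE]; rfl
    have hval : pvB sym E b H (m+1)
        = pvB sym E b H m - (if [E[m]] = sym then 1 else 0)
            + (if [E[m + H]] = sym then 1 else 0) := by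
      unfold pvB
      rw [show m + 1 + H = (m + H) + 1 by ring, pvcnt_succ sym E (m+H) hmHE,
          pvcnt_succ sym E m hmE]
      ring
    have hmem : (((m:Nat):Int), pvB sym E b H m) ∈
        ((List.range (m+1)).map (fun (j : Nat) => ((j:Int), pvB sym E b H j))) :=
      List.mem_map_of_mem (List.mem_range.mpr (by omega))
    rw [hget1, hget2, hi1, hi]
    have hgm : (PySem.Dict.mk ((List.range (m+1)).map
        (fun (j : Nat) => ((j:Int), pvB sym E b H j)))).getD ((m:Nat):Int) 0
        = pvB sym E b H m := by
      exact dict_getD_mem _ _ _ _ hmem (pvnodupfst (m+1) _)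
    rw [hgm, dict_insert_fresh _ _ _ hfresh]
    rw [List.range_succ (n := m+1), List.map_append]
    simp only [List.map_cons, List.map_nil, Option.some.injEq]
    split_ifs with h2 h1 h1
    · rw [dict_getD_last _ _ _ _ hnd hfresh, dict_insert_last _ _ _ _ hfresh,
          dict_getD_last _ _ _ _ hnd hfresh, dict_insert_last _ _ _ _ hfresh]
      rw [hval]
      simp [h1, h2]
    · rw [dict_getD_last _ _ _ _ hnd hfresh, dict_insert_last _ _ _ _ hfresh]
      rw [hval]
      simp [h1, h2]
    · rw [dict_getD_last _ _ _ _ hnd hfresh, dict_insert_last _ _ _ _ hfresh]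
      rw [hval]
      simp [h1, h2]
    · rw [hval]
      simp [h1, h2]

theorem pvgetD_map_range (f : Nat → Int) (L : Nat) (i : Int) (h0 : 0 ≤ i) (hL : i ≤ (L:Int)) :
    PySem.List.pyGetD ((List.range (L+1)).map f) i 0 = f i.toNat := by
  rw [PySem.List.pyGetD_eq_getElem _ _ h0 (by simp; omega)]
  rw [List.getElem_map, List.getElem_range]

theorem pvrange_shift (sym E : List Char) (b : Int) (H M : Nat) :
    (List.range (M+1)).map (fun (j : Nat) => ((j:Int), pvB sym E b H j))
    = ((0:Int), b) :: (List.range M).map (fun (k : Nat) => (((k+1:Nat):Int), pvB sym E b H (k+1))) := by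
  rw [List.range_succ_eq_map, List.map_cons, List.map_map]
  congr 1
  · simp [pvB, pvcnt]



theorem SymbolArray_eq (Genome symbol : String) :
    SymbolArray Genome symbol = SymbolArray_alt Genome symbol := by
  simp only [SymbolArray, SymbolArray_alt]
  have hhalf : PySem.Int.floordiv ((Genome.toList.length : Int)) 2
      = ((Genome.toList.length / 2 : Nat) : Int) := by
    exact_mod_cast PySem.Int.floordiv_natCast Genome.toList.length 2
  rw [hhalf]
  rw [PySem.List.slice_zero_start, PySem.List.slice_to_natCast]
  set g := Genome.toList with hg
  set sym := symbol.toList with hsym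
  set N := g.length with hN
  set H := N / 2 with hH
  set E := g ++ g.take H with hE
  set b := patternCount sym (g.take H) with hb
  have hHle : H ≤ N := Nat.div_le_self _ _
  have hElen : E.length = N + H := by
    rw [hE, List.length_append, List.length_take]
    omega
  rw [pvpre_eq sym E, hElen]
  cases hNM : N with
  | zero =>
    rw [hNM] at *
    rw [show ((0:Nat):Int) = (0:Int) by norm_num]
    rw [PySem.List.pyRange_one_eq_nil (by omega)]
    rfl
  | succ M =>
    -- A side
    have hA := loopA sym E b (M+1) H (hNM ▸ hElen) M (by omega)
    rw [show ((M+1:Nat):Int) = 1 + (M:Int) by push_cast; ring]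
    have hd0 : (PySem.Dict.empty : PySem.Dict Int Int).insert 0 b = PySem.Dict.mk [(0, b)] := rfl
    rw [hd0, hA]
    -- B side
    rw [PySem.Dict.items_foldl_insert_fresh _ (fun a => a)
        (fun i => b + (PySem.List.pyGetD ((List.range (M + 1 + H + 1)).map (pvcnt sym E)) (i + (H:Int)) 0
              - PySem.List.pyGetD ((List.range (M + 1 + H + 1)).map (pvcnt sym E)) ((H:Int)) 0)
              - PySem.List.pyGetD ((List.range (M + 1 + H + 1)).map (pvcnt sym E)) i 0)
        _ ?_ ?_]
    · -- list equality
      show (List.range (M+1)).map (fun (j:Nat) => ((j:Int), pvB sym E b H j))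
          = [((0:Int), b)] ++ _
      rw [pvrange_shift, List.singleton_append]
      congr 1
      rw [PySem.List.pyRange_one 1 (1 + (M:Int))]
      rw [show ((1:Int) + (M:Int) - 1) = ((M:Nat):Int) by ring, Int.toNat_natCast]
      rw [List.map_map]
      apply (List.map_congr_left _).symm
      intro k hk
      rw [List.mem_range] at hk
      simp only [Function.comp]
      rw [show (M + 1 + H + 1) = (M + H + 1) + 1 by omega]
      rw [show ((1:Int) + (k:Int) + (H:Int)) = ((k+1+H : Nat):Int) by push_cast; ring]
      rw [pvgetD_map_range _ _ _ (by positivity) (by push_cast; omega)]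
      rw [pvgetD_map_range _ _ ((H:Nat):Int) (by positivity) (by push_cast; omega)]
      rw [show ((1:Int) + (k:Int)) = ((k+1 : Nat):Int) by push_cast; ring]
      rw [pvgetD_map_range _ _ _ (by positivity) (by push_cast; omega)]
      simp only [Int.toNat_natCast]
      unfold pvB
      refine Prod.ext (by push_cast; ring) ?_
      show _ = b + pvcnt sym E (k+1+H) - pvcnt sym E H - pvcnt sym E (k+1)
      ring
    · intro a ha
      have h1a := PySem.List.mem_pyRange_one.mp ha
      simp [PySem.Dict.contains_mk]
      omega
    · simpa using PySem.List.nodup_pyRange_one 1 (1 + (M:Int))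

-- ===== VERDICT (by name: the statement is the Claim_ definition above) =====
theorem SymbolArray_spec : Claim_equal_SymbolArray := by
  intro Genome symbol _
  exact SymbolArray_eq Genome symbol
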